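-- pv_equiv track=rewrite | github.com/mreishus/aoc | 2015/python2015/aoc/day25.py | part1
-- ===== SOURCE A (Python) =====
-- def part1(target_x: int, target_y: int) -> int:
--     x = 1
--     y = 1
--     val = 20151125
--
--     while y != target_y or x != target_x:
--         if y == 1:
--             y = x + 1
--             x = 1
--         else:
--             x += 1
--             y -= 1
--         val = (val * 252533) % 33554393
--     return val
-- ===== SOURCE B (Python) =====
-- def part1(target_x: int, target_y: int) -> int:
--     d = target_x + target_y - 2
--     n = d * (d + 1) // 2 + (target_x - 1)
--     return 20151125 * pow(252533, n, 33554393) % 33554393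
-- ===== Notes on version B (the rewrite author's own statement) =====
-- stated objective: faster
-- what changed: Replaces the step-by-step diagonal walk (one modular multiplication per cell) by a closed-form computation of the cell's index followed by a single modular exponentiation pow(252533, n, 33554393).
import Mathlib
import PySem

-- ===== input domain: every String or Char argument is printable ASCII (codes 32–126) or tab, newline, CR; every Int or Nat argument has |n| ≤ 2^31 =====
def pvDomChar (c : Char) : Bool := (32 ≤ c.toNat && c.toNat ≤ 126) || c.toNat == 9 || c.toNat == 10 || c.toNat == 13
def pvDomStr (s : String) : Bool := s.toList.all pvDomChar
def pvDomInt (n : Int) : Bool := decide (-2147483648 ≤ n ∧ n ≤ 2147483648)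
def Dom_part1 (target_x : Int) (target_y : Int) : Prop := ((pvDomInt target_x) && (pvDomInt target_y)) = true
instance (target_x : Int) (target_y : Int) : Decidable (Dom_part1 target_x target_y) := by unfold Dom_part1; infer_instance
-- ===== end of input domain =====

-- B replaces A's cell-by-cell diagonal walk by a closed-form index plus one modular
-- exponentiation (objective: faster, asymptotic).


-- ===== PORT A =====
-- Triangle number, used only to compute the fuel bound for A's while-loop
-- (the loop runs exactly this many iterations when 1 ≤ x and 1 ≤ y).
def pvTri : Nat → Nat
  | 0 => 0
  | n + 1 => (n + 1) + pvTri n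

def pvIdx (x y : Int) : Nat := pvTri (x + y - 2).toNat + (x - 1).toNat

-- The while-loop of A, transliterated with a fuel that equals the exact number of
-- iterations on every input A terminates on.
def part1Loop (tx ty : Int) : Nat → Int → Int → Int → Int
  | 0, _, _, val => val
  | f + 1, x, y, val =>
    if y ≠ ty ∨ x ≠ tx then
      if y = 1 then
        part1Loop tx ty f 1 (x + 1) (PySem.Int.mod (val * 252533) 33554393)
      else
        part1Loop tx ty f (x + 1) (y - 1) (PySem.Int.mod (val * 252533) 33554393)
    else val

def part1 (target_x : Int) (target_y : Int) : Int :=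
  part1Loop target_x target_y (pvIdx target_x target_y) 1 1 20151125

-- ===== PORT B =====
def part1_alt (target_x : Int) (target_y : Int) : Int :=
  let d := target_x + target_y - 2
  let n := PySem.Int.floordiv (d * (d + 1)) 2 + (target_x - 1)
  PySem.Int.mod (20151125 * PySem.Int.powMod 252533 n.toNat 33554393) 33554393

-- ===== PRECONDITION & SPEC =====
-- Pre_ excludes target_x < 1 or target_y < 1: there the Python while-loop never
-- reaches the target and A diverges (returns nothing).
def Pre_part1 (target_x : Int) (target_y : Int) : Prop := 1 ≤ target_x ∧ 1 ≤ target_y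
instance (target_x : Int) (target_y : Int) : Decidable (Pre_part1 target_x target_y) := by
  unfold Pre_part1; infer_instance
def pvWitness_part1 : Int × Int := (3, 2)

def Spec_part1 (target_x : Int) (target_y : Int) (out : Int) : Prop := out = part1_alt target_x target_y
instance (target_x : Int) (target_y : Int) (out : Int) : Decidable (Spec_part1 target_x target_y out) := by unfold Spec_part1; infer_instance

-- ===== CLAIM (what is proved, stated in full; the proofs are below) =====
def Claim_equal_part1 : Prop := ∀ (target_x : Int) (target_y : Int), Dom_part1 target_x target_y → Pre_part1 target_x target_y → Spec_part1 target_x target_y (part1 target_x target_y)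

-- ===== LEMMAS AND PROOFS =====

-- Position after k steps of A's walk, starting from (1,1).
def pvStep (x y : Int) : Int × Int := if y = 1 then (1, x + 1) else (x + 1, y - 1)

def pvPos : Nat → Int × Int
  | 0 => (1, 1)
  | k + 1 => pvStep (pvPos k).1 (pvPos k).2

def pvVal : Nat → Int
  | 0 => 20151125
  | k + 1 => PySem.Int.mod (pvVal k * 252533) 33554393

lemma pvPos_valid (k : Nat) : 1 ≤ (pvPos k).1 ∧ 1 ≤ (pvPos k).2 := by
  induction k with
  | zero => simp [pvPos]
  | succ k ih =>
    simp only [pvPos, pvStep]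
    split_ifs <;> constructor <;> simp <;> omega

lemma pvIdx_step (x y : Int) (hx : 1 ≤ x) (hy : 1 ≤ y) :
    pvIdx (pvStep x y).1 (pvStep x y).2 = pvIdx x y + 1 := by
  unfold pvStep pvIdx
  split_ifs with h
  · subst h
    have h1 : (1 + (x + 1) - 2) = x - 1 + 1 := by ring
    have h3 : x + 1 - 2 = x - 1 := by ring
    have h2 : (x - 1 + 1).toNat = (x - 1).toNat + 1 := by omega
    simp only [h1, h3, h2, pvTri]
    omega
  · simp only
    have h1 : (x + 1 + (y - 1) - 2) = x + y - 2 := by ring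
    rw [h1]
    omega

lemma pvPos_idx (k : Nat) : pvIdx (pvPos k).1 (pvPos k).2 = k := by
  induction k with
  | zero => decide
  | succ k ih =>
    obtain ⟨h1, h2⟩ := pvPos_valid k
    show pvIdx (pvStep (pvPos k).1 (pvPos k).2).1 (pvStep (pvPos k).1 (pvPos k).2).2 = k + 1
    rw [pvIdx_step _ _ h1 h2]
    omega

lemma part1Loop_run (tx ty : Int) (htx : 1 ≤ tx) (hty : 1 ≤ ty) :
    ∀ (f k : Nat), f + k = pvIdx tx ty →
      part1Loop tx ty f (pvPos k).1 (pvPos k).2 (pvVal k) = pvVal (pvIdx tx ty) := by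
  intro f
  induction f with
  | zero =>
    intro k hk
    simp only [part1Loop]
    simp at hk
    rw [hk]
  | succ f ih =>
    intro k hk
    have hne : ¬ ((pvPos k).2 = ty ∧ (pvPos k).1 = tx) := by
      rintro ⟨h2, h1⟩
      have hidx : pvIdx (pvPos k).1 (pvPos k).2 = k := pvPos_idx k
      rw [h1, h2] at hidx
      omega
    have hcond : (pvPos k).2 ≠ ty ∨ (pvPos k).1 ≠ tx := by tauto
    simp only [part1Loop, if_pos hcond]
    have hstep : ∀ v, (if (pvPos k).2 = 1 then
        part1Loop tx ty f 1 ((pvPos k).1 + 1) (PySem.Int.mod (v * 252533) 33554393)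
      else
        part1Loop tx ty f ((pvPos k).1 + 1) ((pvPos k).2 - 1) (PySem.Int.mod (v * 252533) 33554393)) =
        part1Loop tx ty f (pvStep (pvPos k).1 (pvPos k).2).1 (pvStep (pvPos k).1 (pvPos k).2).2
          (PySem.Int.mod (v * 252533) 33554393) := by
      intro v
      unfold pvStep
      split_ifs <;> rfl
    rw [hstep]
    have : part1Loop tx ty f (pvPos (k+1)).1 (pvPos (k+1)).2 (pvVal (k+1)) = pvVal (pvIdx tx ty) :=
      ih (k + 1) (by omega)
    simpa [pvPos, pvVal] using this

lemma pvVal_closed (k : Nat) : pvVal k = (20151125 * 252533 ^ k) % 33554393 := by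
  induction k with
  | zero => decide
  | succ k ih =>
    show PySem.Int.mod (pvVal k * 252533) 33554393 = _
    rw [PySem.Int.mod_eq_emod_of_pos (by norm_num : (0:Int) < 33554393), ih]
    rw [Int.mul_emod, Int.emod_emod_of_dvd _ (dvd_refl _), ← Int.mul_emod]
    rw [pow_succ, ← mul_assoc]

lemma pvTri_two (s : Nat) : 2 * pvTri s = s * (s + 1) := by
  induction s with
  | zero => rfl
  | succ s ih =>
    simp only [pvTri]
    rw [Nat.mul_add, ih]
    ring

-- ===== VERDICT (by name: the statement is the Claim_ definition above) =====
theorem part1_spec : Claim_equal_part1 := by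
  intro tx ty _ ⟨htx, hty⟩
  unfold Spec_part1
  -- A's side: the loop runs pvIdx tx ty iterations
  have hA : part1 tx ty = pvVal (pvIdx tx ty) := by
    have := part1Loop_run tx ty htx hty (pvIdx tx ty) 0 (by omega)
    simpa [part1, pvPos, pvVal] using this
  -- B's side: the computed exponent equals pvIdx tx ty
  have hd : (0:Int) ≤ tx + ty - 2 := by omega
  set s : Nat := (tx + ty - 2).toNat with hs
  have hcast : tx + ty - 2 = (s : Int) := by omega
  have hfd : PySem.Int.floordiv ((tx + ty - 2) * (tx + ty - 2 + 1)) 2 = (pvTri s : Int) := by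
    rw [PySem.Int.floordiv_eq_ediv_of_pos (by norm_num : (0:Int) < 2), hcast]
    have : ((s : Int)) * ((s : Int) + 1) = 2 * (pvTri s : Int) := by
      have h := congrArg (Nat.cast : Nat → Int) (pvTri_two s)
      push_cast at h
      linarith
    rw [this, Int.mul_ediv_cancel_left _ (by norm_num)]
  have hn : (PySem.Int.floordiv ((tx + ty - 2) * (tx + ty - 2 + 1)) 2 + (tx - 1)).toNat
      = pvIdx tx ty := by
    rw [hfd]
    unfold pvIdx
    have h2 : (tx + ty - 2).toNat = s := by omega
    rw [h2]
    omega
  have hB : part1_alt tx ty = (20151125 * 252533 ^ (pvIdx tx ty)) % 33554393 := by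
    show PySem.Int.mod (20151125 * PySem.Int.powMod 252533
        ((PySem.Int.floordiv ((tx + ty - 2) * (tx + ty - 2 + 1)) 2 + (tx - 1)).toNat) 33554393)
        33554393 = _
    rw [hn, PySem.Int.mod_eq_emod_of_pos (by norm_num : (0:Int) < 33554393),
        PySem.Int.powMod_eq_emod _ _ (by norm_num : (0:Int) < 33554393)]
    conv_rhs => rw [Int.mul_emod]
    rw [Int.mul_emod, Int.emod_emod_of_dvd _ (dvd_refl _)]
  rw [hA, hB, pvVal_closed]
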